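-- pv_equiv track=rewrite | github.com/igamenovoer/PeiDocker | src/pei_docker/user_config.py | port_mapping_dict_to_str
-- ===== SOURCE A (Python) =====
-- def port_mapping_dict_to_str(port_mapping: dict[int, int]) -> list[str]:
--     """
--     Convert port mapping dictionary to string format.
--
--     Transforms a dictionary of host-to-container port mappings into Docker-style
--     port mapping strings. Automatically detects and optimizes consecutive port
--     ranges into range notation for cleaner configuration.
--
--     Parameters
--     ----------
--     port_mapping : Dict[int, int]
--         Dictionary mapping host port numbers to container port numbers.
--
--     Returns
--     -------
--     List[str]
--         List of port mapping strings in formats: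
--         - Single: "8080:80" for individual port mappings
--         - Range: "8000-8010:9000-9010" for consecutive port sequences
--
--     Examples
--     --------
--     Individual port mappings:
--         >>> port_mapping_dict_to_str({8080: 80, 3000: 3000})
--         ['8080:80', '3000:3000']
--
--     Consecutive ports optimized to range:
--         >>> port_mapping_dict_to_str({8000: 9000, 8001: 9001, 8002: 9002})
--         ['8000-8002:9000-9002']
--
--     Mixed individual and range mappings:
--         >>> port_mapping_dict_to_str({8080: 80, 9000: 9000, 9001: 9001})
--         ['8080:80', '9000-9001:9000-9001']
--
--     Notes
--     -----
--     The function automatically detects consecutive port sequences and converts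
--     them to range notation for more compact representation. Port mappings are
--     sorted by host port number for consistent output.
--     """
--
--     output : list[str] = []
--
--     if len(port_mapping) == 0:
--         return output
--
--     port_from_range_start : int = -1
--     port_to_range_start : int = -1
--     port_from_prev : int = -1
--     port_to_prev : int = -1
--
--     for port_from, port_to in sorted(port_mapping.items()):
--         # first port, initialize the range
--         if port_from_prev == -1:
--             port_from_range_start = port_from
--             port_to_range_start = port_to
--         elif port_from_prev == port_from - 1 and port_to_prev == port_to - 1:
--             # we are in a range, no need to do anything
--             pass
--         else:
--             # the previous range has ended, add it to the output
--             if port_from_range_start == port_from_prev: # single port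
--                 port_mapping_entry = f'{port_from_range_start}:{port_to_range_start}'
--                 output.append(port_mapping_entry)
--             else:
--                 port_mapping_entry = f'{port_from_range_start}-{port_from_prev}:{port_to_range_start}-{port_to_prev}'
--                 output.append(port_mapping_entry)
--
--             # start a new range
--             port_from_range_start = port_from
--             port_to_range_start = port_to
--
--         # update prev
--         port_from_prev = port_from
--         port_to_prev = port_to
--
--     # output the last range
--     if port_from_range_start == port_from_prev: # single port
--         port_mapping_entry = f'{port_from_range_start}:{port_to_range_start}'
--         output.append(port_mapping_entry)
--     else:
--         port_mapping_entry = f'{port_from_range_start}-{port_from_prev}:{port_to_range_start}-{port_to_prev}'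
--         output.append(port_mapping_entry)
--
--     return output
-- ===== SOURCE B (Python) =====
-- from itertools import groupby
--
--
-- def port_mapping_dict_to_str(port_mapping: dict[int, int]) -> list[str]:
--     items = sorted(port_mapping.items())
--     output: list[str] = []
--     for _, grp in groupby(enumerate(items), key=lambda t: (t[1][0] - t[0], t[1][1] - t[0])):
--         group = [pair for _, pair in grp]
--         pf0, pt0 = group[0]
--         pf1, pt1 = group[-1]
--         if pf0 == pf1:
--             output.append(f'{pf0}:{pt0}')
--         else:
--             output.append(f'{pf0}-{pf1}:{pt0}-{pt1}')
--     return output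
-- ===== Notes on version B (the rewrite author's own statement) =====
-- stated objective: idiomatic
-- what changed: Replaces A's sentinel-driven state machine (range-start/prev registers initialised to -1 with an explicit flush-on-break and a duplicated final flush) by the idiomatic sort + enumerate + itertools.groupby on the key (port_from - index, port_to - index), rendering each group from its first and last elements.
-- intended difference: On dicts that contain host port -1 together with some larger host port, A's sentinel check 'port_from_prev == -1' mistakes the entry after -1 for the first one and silently drops the pending range ending at -1, while B returns all mappings, which is the intended conversion. — e.g. on port_mapping_dict_to_str([(-1, 5), (0, 7)]): A returns ["0:7"], B returns ["-1:5", "0:7"]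
import Mathlib
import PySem

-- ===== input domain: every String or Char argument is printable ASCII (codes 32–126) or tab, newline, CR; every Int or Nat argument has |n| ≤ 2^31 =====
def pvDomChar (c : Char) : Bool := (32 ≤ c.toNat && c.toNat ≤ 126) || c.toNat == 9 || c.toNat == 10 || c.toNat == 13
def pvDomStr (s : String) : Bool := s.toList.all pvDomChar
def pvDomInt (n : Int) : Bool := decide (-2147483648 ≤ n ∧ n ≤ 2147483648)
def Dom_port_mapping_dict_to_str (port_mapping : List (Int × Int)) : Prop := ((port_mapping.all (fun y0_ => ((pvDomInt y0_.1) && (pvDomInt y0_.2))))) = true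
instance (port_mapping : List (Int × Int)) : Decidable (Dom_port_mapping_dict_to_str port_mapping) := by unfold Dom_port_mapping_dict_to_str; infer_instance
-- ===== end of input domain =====

-- B replaces A's sentinel-register state machine by the idiomatic sort + enumerate + groupby((pf-i, pt-i)) decomposition;
-- on dicts containing host port -1 before a larger host port A's sentinel logic drops a range (see D_ below), B keeps it.

-- ===== PORT A =====
-- loop body of A's 'for port_from, port_to in sorted(port_mapping.items())', state = (output, range_start_from, range_start_to, prev_from, prev_to)
def pvStepA (st : List String × Int × Int × Int × Int) (p : Int × Int) : List String × Int × Int × Int × Int :=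
  match st with
  | (output, frs, trs, fpr, tpr) =>
    if fpr == -1 then (output, p.1, p.2, p.1, p.2)
    else if fpr == p.1 - 1 && tpr == p.2 - 1 then (output, frs, trs, p.1, p.2)
    else ((output ++ [if frs == fpr then PySem.Int.toStr frs ++ ":" ++ PySem.Int.toStr trs
                      else PySem.Int.toStr frs ++ "-" ++ PySem.Int.toStr fpr ++ ":" ++ PySem.Int.toStr trs ++ "-" ++ PySem.Int.toStr tpr]),
          p.1, p.2, p.1, p.2)

def port_mapping_dict_to_str (port_mapping : List (Int × Int)) : List String :=
  let d := PySem.Dict.ofList port_mapping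
  if d.size == 0 then [] else
  match (PySem.List.sorted2 d.items (fun p => p.1) (fun p => p.2)).foldl pvStepA ([], -1, -1, -1, -1) with
  | (output, frs, trs, fpr, tpr) =>
      output ++ [if frs == fpr then PySem.Int.toStr frs ++ ":" ++ PySem.Int.toStr trs
                 else PySem.Int.toStr frs ++ "-" ++ PySem.Int.toStr fpr ++ ":" ++ PySem.Int.toStr trs ++ "-" ++ PySem.Int.toStr tpr]

-- ===== PORT B =====
-- itertools.groupby(l, key): maximal runs of adjacent elements with equal key, in order (each group nonempty)
def pvGroupBy {α β : Type} [BEq β] (key : α → β) : List α → List (List α)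
  | [] => []
  | a :: as =>
    match pvGroupBy key as with
    | [] => [[a]]
    | [] :: gs => [a] :: [] :: gs  -- unreachable: groups are nonempty
    | (b :: g) :: gs => if key a == key b then (a :: b :: g) :: gs else [a] :: (b :: g) :: gs

-- the groupby key lambda of Source B
def pvKeyB (t : Int × (Int × Int)) : Int × Int := (t.2.1 - t.1, t.2.2 - t.1)

-- body of Source B's for-loop: render one group from its first and last pairs
def pvRenderGroup (g : List (Int × (Int × Int))) : String :=
  match g.head?, g.getLast? with
  | some (_, pf0, pt0), some (_, pf1, pt1) =>
      if pf0 == pf1 then PySem.Int.toStr pf0 ++ ":" ++ PySem.Int.toStr pt0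
      else PySem.Int.toStr pf0 ++ "-" ++ PySem.Int.toStr pf1 ++ ":" ++ PySem.Int.toStr pt0 ++ "-" ++ PySem.Int.toStr pt1
  | _, _ => ""  -- unreachable: groups are nonempty

def port_mapping_dict_to_str_alt (port_mapping : List (Int × Int)) : List String :=
  let items := PySem.List.sorted2 (PySem.Dict.ofList port_mapping).items (fun p => p.1) (fun p => p.2)
  (pvGroupBy pvKeyB (PySem.List.enumerate items)).map pvRenderGroup

-- ===== PRECONDITION & SPEC =====
-- On dicts containing host port -1 together with some host port > -1, A's sentinel check
-- 'port_from_prev == -1' mistakes the entry after -1 for the first one and silently drops the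
-- pending range ending at -1; B returns all mappings, which is the intended conversion.
def D_port_mapping_dict_to_str (port_mapping : List (Int × Int)) : Prop :=
  (port_mapping.any (fun p => p.1 == -1) && port_mapping.any (fun p => decide (p.1 > -1))) = true
instance (port_mapping : List (Int × Int)) : Decidable (D_port_mapping_dict_to_str port_mapping) := by unfold D_port_mapping_dict_to_str; infer_instance

def Spec_port_mapping_dict_to_str (port_mapping : List (Int × Int)) (out : List String) : Prop :=
  ¬ D_port_mapping_dict_to_str port_mapping → out = port_mapping_dict_to_str_alt port_mapping
instance (port_mapping : List (Int × Int)) (out : List String) : Decidable (Spec_port_mapping_dict_to_str port_mapping out) := by unfold Spec_port_mapping_dict_to_str; infer_instance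

def pvDiffWitness_port_mapping_dict_to_str : (List (Int × Int)) := [(-1, 5), (0, 7)]
def pvDiffWitnessOut_port_mapping_dict_to_str : (List String) × (List String) := (["0:7"], ["-1:5", "0:7"])

-- ===== CLAIM (what is proved, stated in full; the proofs are below) =====
def Claim_unchanged_port_mapping_dict_to_str : Prop := ∀ (port_mapping : List (Int × Int)), Dom_port_mapping_dict_to_str port_mapping → Spec_port_mapping_dict_to_str port_mapping (port_mapping_dict_to_str port_mapping)
def Claim_changed_port_mapping_dict_to_str : Prop := Dom_port_mapping_dict_to_str (pvDiffWitness_port_mapping_dict_to_str) ∧ D_port_mapping_dict_to_str (pvDiffWitness_port_mapping_dict_to_str) ∧ port_mapping_dict_to_str (pvDiffWitness_port_mapping_dict_to_str) = pvDiffWitnessOut_port_mapping_dict_to_str.1 ∧ port_mapping_dict_to_str_alt (pvDiffWitness_port_mapping_dict_to_str) = pvDiffWitnessOut_port_mapping_dict_to_str.2 ∧ pvDiffWitnessOut_port_mapping_dict_to_str.1 ≠ pvDiffWitnessOut_port_mapping_dict_to_str.2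

-- ===== LEMMAS AND PROOFS =====

-- the rendered string of one maximal run, and the common run recursion both loops compute
def pvEmit (f0 t0 fp tp : Int) : String :=
  if f0 == fp then PySem.Int.toStr f0 ++ ":" ++ PySem.Int.toStr t0
  else PySem.Int.toStr f0 ++ "-" ++ PySem.Int.toStr fp ++ ":" ++ PySem.Int.toStr t0 ++ "-" ++ PySem.Int.toStr tp

def pvGo (f0 t0 fp tp : Int) : List (Int × Int) → List String
  | [] => [pvEmit f0 t0 fp tp]
  | c :: rest =>
    if fp == c.1 - 1 && tp == c.2 - 1 then pvGo f0 t0 c.1 c.2 rest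
    else pvEmit f0 t0 fp tp :: pvGo c.1 c.2 c.1 c.2 rest

-- A's loop, run from a state whose prev-register is not the -1 sentinel, is the run recursion
lemma pvFoldA (l : List (Int × Int)) (out : List String) (f0 t0 fp tp : Int)
    (hfp : l ≠ [] → fp ≠ -1) (hl : ∀ x ∈ l.dropLast, x.1 ≠ -1) :
    (match l.foldl pvStepA (out, f0, t0, fp, tp) with
     | (output, frs, trs, fpr, tpr) => output ++ [pvEmit frs trs fpr tpr]) =
    out ++ pvGo f0 t0 fp tp l := by
  induction l generalizing out f0 t0 fp tp with
  | nil => simp [pvGo, pvEmit]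
  | cons c rest ih =>
    have hfp' : fp ≠ -1 := hfp (by simp)
    have hstep : pvStepA (out, f0, t0, fp, tp) c =
        if fp == c.1 - 1 && tp == c.2 - 1 then (out, f0, t0, c.1, c.2)
        else (out ++ [pvEmit f0 t0 fp tp], c.1, c.2, c.1, c.2) := by
      simp [pvStepA, pvEmit, hfp']
    have hrest_ne : rest ≠ [] → c.1 ≠ -1 := by
      intro hne
      exact hl c (by cases rest with
        | nil => exact absurd rfl hne
        | cons d ds => simp [List.dropLast])
    have hl' : ∀ x ∈ rest.dropLast, x.1 ≠ -1 := by
      intro x hx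
      cases rest with
      | nil => simp at hx
      | cons d ds =>
        exact hl x (by simp [List.dropLast] at hx ⊢; right; exact hx)
    by_cases hadj : (fp == c.1 - 1 && tp == c.2 - 1) = true
    · rw [List.foldl_cons, hstep, if_pos hadj]
      rw [ih out f0 t0 c.1 c.2 hrest_ne hl']
      simp [pvGo, hadj]
    · rw [List.foldl_cons, hstep, if_neg hadj]
      rw [ih (out ++ [pvEmit f0 t0 fp tp]) c.1 c.2 c.1 c.2 hrest_ne hl']
      simp [pvGo, hadj]

-- B's groupby over the enumerated items is the same run recursion; the first group starts at the
-- head, its last element closes the first run, and the remaining groups render the tail runs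
lemma pvGroupB (as : List (Int × Int)) (a : Int × Int) (i : Int) :
    ∃ g gs iL L rest,
      pvGroupBy pvKeyB (PySem.List.enumerate (a :: as) i) = ((i, a) :: g) :: gs ∧
      ((i, a) :: g).getLast? = some (iL, L) ∧
      List.map pvRenderGroup gs = rest ∧
      ∀ f0 t0 : Int, pvGo f0 t0 a.1 a.2 as = pvEmit f0 t0 L.1 L.2 :: rest := by
  induction as generalizing a i with
  | nil =>
    refine ⟨[], [], i, a, [], ?_, ?_, rfl, ?_⟩
    · simp [PySem.List.enumerate_cons, PySem.List.enumerate_nil, pvGroupBy]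
    · rfl
    · intro f0 t0; simp [pvGo]
  | cons b bs ih =>
    obtain ⟨g, gs, iL, L, rest, h1, h2, h3, h4⟩ := ih b (i + 1)
    have hkey : (pvKeyB (i, a) == pvKeyB (i + 1, b)) = (a.1 == b.1 - 1 && a.2 == b.2 - 1) := by
      rw [Bool.eq_iff_iff]
      simp [pvKeyB, Prod.ext_iff]
      omega
    by_cases hadj : (a.1 == b.1 - 1 && a.2 == b.2 - 1) = true
    · refine ⟨(i + 1, b) :: g, gs, iL, L, rest, ?_, ?_, h3, ?_⟩
      · rw [PySem.List.enumerate_cons]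
        simp only [pvGroupBy]
        rw [h1]
        show (if (pvKeyB (i, a) == pvKeyB (i + 1, b)) = true then ((i, a) :: (i + 1, b) :: g) :: gs
              else [(i, a)] :: ((i + 1, b) :: g) :: gs) = _
        rw [hkey, if_pos hadj]
      · rw [List.getLast?_cons_cons]; exact h2
      · intro f0 t0
        simp only [pvGo, hadj, if_pos]
        exact h4 f0 t0
    · refine ⟨[], ((i + 1, b) :: g) :: gs, i, a, pvRenderGroup ((i + 1, b) :: g) :: rest, ?_, rfl, ?_, ?_⟩
      · rw [PySem.List.enumerate_cons]
        simp only [pvGroupBy]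
        rw [h1]
        show (if (pvKeyB (i, a) == pvKeyB (i + 1, b)) = true then ((i, a) :: (i + 1, b) :: g) :: gs
              else [(i, a)] :: ((i + 1, b) :: g) :: gs) = _
        rw [hkey, if_neg hadj]
      · simp [h3]
      · intro f0 t0
        simp only [pvGo, eq_false_of_ne_true hadj, Bool.false_eq_true, if_false]
        congr 1
        have : pvRenderGroup ((i + 1, b) :: g) = pvEmit b.1 b.2 L.1 L.2 := by
          simp [pvRenderGroup, h2, pvEmit]
        rw [h4 b.1 b.2, this]

-- sorted2's comparison, and sortedness of its output in the first component
def pvLtB (a b : Int × Int) : Bool :=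
  decide (a.1 < b.1) || (!decide (b.1 < a.1) && decide (a.2 < b.2))

lemma pvLtB_asymm {a b : Int × Int} (h : pvLtB a b = true) : pvLtB b a = false := by
  simp [pvLtB] at h ⊢; omega

lemma pvLtB_trans {a b c : Int × Int} (h1 : pvLtB a b = true) (h2 : pvLtB b c = true) : pvLtB a c = true := by
  simp [pvLtB] at h1 h2 ⊢; omega

lemma pvInsertBy_pw (x : Int × Int) (ys : List (Int × Int))
    (h : ys.Pairwise fun a b => pvLtB b a = false) :
    (PySem.List.insertBy pvLtB x ys).Pairwise (fun a b => pvLtB b a = false) := by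
  induction ys with
  | nil => simp [PySem.List.insertBy]
  | cons y ys ih =>
    rw [List.pairwise_cons] at h
    obtain ⟨hy, hys⟩ := h
    by_cases hxy : pvLtB x y = true
    · rw [PySem.List.insertBy, if_pos hxy]
      refine List.Pairwise.cons ?_ (List.Pairwise.cons hy hys)
      intro z hz
      rcases List.mem_cons.mp hz with rfl | hz
      · exact pvLtB_asymm hxy
      · by_contra hc
        have hzx : pvLtB z x = true := by
          cases hzx' : pvLtB z x with
          | true => rfl
          | false => exact absurd hzx' hc
        exact absurd (hy z hz) (by simp [pvLtB_trans hzx hxy])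
    · rw [PySem.List.insertBy, if_neg hxy]
      refine List.Pairwise.cons ?_ (ih hys)
      intro z hz
      rcases (PySem.List.mem_insertBy _ _ _ _).mp hz with rfl | hz
      · exact eq_false_of_ne_true hxy
      · exact hy z hz

lemma pvSorted2_pairwise (xs : List (Int × Int)) :
    (PySem.List.sorted2 xs (fun p => p.1) (fun p => p.2)).Pairwise (fun a b => a.1 ≤ b.1) := by
  have key : ∀ (l : List (Int × Int)) (acc : List (Int × Int)),
      acc.Pairwise (fun a b => pvLtB b a = false) →
      (l.foldl (fun acc x => PySem.List.insertBy pvLtB x acc) acc).Pairwise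
        (fun a b => pvLtB b a = false) := by
    intro l
    induction l with
    | nil => intro acc h; simpa using h
    | cons x xs ih => intro acc h; exact ih _ (pvInsertBy_pw x acc h)
  have heq : PySem.List.sorted2 xs (fun p => p.1) (fun p => p.2) =
      xs.foldl (fun acc x => PySem.List.insertBy pvLtB x acc) [] := rfl
  rw [heq]
  refine (key xs [] (by simp)).imp ?_
  intro a b hab
  simp [pvLtB] at hab
  omega

-- every first component of the sorted dict items is a host port of the input list
lemma pvKeysSub (pm : List (Int × Int)) (x : Int × Int)
    (hx : x ∈ PySem.List.sorted2 (PySem.Dict.ofList pm).items (fun p => p.1) (fun p => p.2)) :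
    ∃ p ∈ pm, p.1 = x.1 := by
  have hmem : x ∈ (PySem.Dict.ofList pm).items :=
    (PySem.List.sorted2_perm _ _ _ _).mem_iff.mp hx
  have hk : x.1 ∈ (PySem.Dict.ofList pm).keys := by
    simp only [PySem.Dict.keys]
    exact List.mem_map_of_mem hmem
  have hkeys : (PySem.Dict.ofList pm).keys =
      PySem.Set.update (PySem.Dict.empty : PySem.Dict Int Int).keys (pm.map (fun p => p.1)) := by
    show (pm.foldl (fun d x => d.insert x.1 x.2) (PySem.Dict.empty : PySem.Dict Int Int)).keys = _
    exact PySem.Dict.keys_foldl_insert_key pm (fun p => p.1) (fun _ p => p.2) PySem.Dict.empty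
  rw [hkeys] at hk
  rcases (PySem.Set.mem_update _ _ _).mp hk with h | h
  · rw [PySem.Dict.keys_empty] at h; simp at h
  · obtain ⟨p, hp, hpe⟩ := List.mem_map.mp h
    exact ⟨p, hp, hpe⟩

-- outside D_, every non-last element of the sorted items has host port ≠ -1
lemma pvNoMinus1 (pm : List (Int × Int)) (hnd : ¬ D_port_mapping_dict_to_str pm) :
    ∀ x ∈ (PySem.List.sorted2 (PySem.Dict.ofList pm).items (fun p => p.1) (fun p => p.2)).dropLast,
      x.1 ≠ -1 := by
  intro x hx hx1
  set items := PySem.List.sorted2 (PySem.Dict.ofList pm).items (fun p => p.1) (fun p => p.2) with hitems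
  unfold D_port_mapping_dict_to_str at hnd
  simp only [Bool.and_eq_true, List.any_eq_true, beq_iff_eq, decide_eq_true_eq, not_and_or,
    not_exists] at hnd
  -- locate x inside items, with a successor
  obtain ⟨i, hi, hxe⟩ := List.mem_iff_getElem.mp hx
  have hlen : items.dropLast.length = items.length - 1 := by simp
  have hi1 : i + 1 < items.length := by omega
  have hgx : items[i]'(by omega) = x := by
    rw [← hxe, List.getElem_dropLast]
  -- strict sortedness in the first component
  have hpw : items.Pairwise (fun a b => a.1 ≤ b.1) := pvSorted2_pairwise _
  have hnodup : (items.map (fun p => p.1)).Nodup := by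
    have h1 : (PySem.Dict.ofList pm).keys.Nodup := PySem.Dict.nodup_keys_ofList pm
    have h2 : (items.map (fun p => p.1)).Perm ((PySem.Dict.ofList pm).items.map (fun p => p.1)) :=
      (PySem.List.sorted2_perm _ _ _ _).map _
    exact h2.nodup_iff.mpr h1
  have hne : items.Pairwise (fun a b => a.1 ≠ b.1) := List.pairwise_map.mp hnodup
  have hlt : x.1 < (items[i+1]'hi1).1 := by
    have := (List.pairwise_iff_getElem.mp hpw) i (i+1) (by omega) hi1 (by omega)
    have h2 := (List.pairwise_iff_getElem.mp hne) i (i+1) (by omega) hi1 (by omega)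
    rw [hgx] at this h2
    omega
  have hy : (items[i+1]'hi1).1 > -1 := by omega
  -- the successor's key is a key of pm
  obtain ⟨p, hp, hpe⟩ := pvKeysSub pm (items[i+1]'hi1) (List.getElem_mem hi1)
  obtain ⟨q, hq, hqe⟩ := pvKeysSub pm x (List.mem_of_mem_dropLast hx)
  rcases hnd with h | h
  · rcases h q with h' | h' <;> [exact h' hq; omega]
  · rcases h p with h' | h' <;> [exact h' hp; omega]


-- ===== VERDICT (by name: the statement is the Claim_ definition above) =====
theorem port_mapping_dict_to_str_spec : Claim_unchanged_port_mapping_dict_to_str := by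
  intro pm _hdom
  unfold Spec_port_mapping_dict_to_str
  intro hnd
  have hAeq : port_mapping_dict_to_str pm =
      (if ((PySem.Dict.ofList pm).size == 0) = true then []
       else match (PySem.List.sorted2 (PySem.Dict.ofList pm).items (fun p => p.1)
                    (fun p => p.2)).foldl pvStepA ([], -1, -1, -1, -1) with
            | (output, frs, trs, fpr, tpr) => output ++ [pvEmit frs trs fpr tpr]) := rfl
  have hBeq : port_mapping_dict_to_str_alt pm =
      (pvGroupBy pvKeyB (PySem.List.enumerate
        (PySem.List.sorted2 (PySem.Dict.ofList pm).items (fun p => p.1)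
          (fun p => p.2)))).map pvRenderGroup := rfl
  rw [hAeq, hBeq]
  have hperm := PySem.List.sorted2_perm (PySem.Dict.ofList pm).items (fun p => p.1) (fun p => p.2) false
  have hnl := pvNoMinus1 pm hnd
  cases hit : PySem.List.sorted2 (PySem.Dict.ofList pm).items (fun p => p.1) (fun p => p.2) with
  | nil =>
    rw [hit] at hperm
    have hnil : (PySem.Dict.ofList pm).items = [] := hperm.symm.eq_nil
    have hsz : ((PySem.Dict.ofList pm).size == 0) = true := by
      simp [PySem.Dict.size, hnil]
    rw [if_pos hsz]
    simp [PySem.List.enumerate_nil, pvGroupBy]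
  | cons h t =>
    rw [hit] at hperm hnl
    have hlen : (PySem.Dict.ofList pm).items.length = t.length + 1 := by
      simpa using hperm.length_eq.symm
    have hsz : ((PySem.Dict.ofList pm).size == 0) = false := by
      simp [PySem.Dict.size, hlen]
    rw [if_neg (by simp [hsz])]
    rw [List.foldl_cons]
    have hstep1 : pvStepA ([], -1, -1, -1, -1) h = ([], h.1, h.2, h.1, h.2) := by
      simp [pvStepA]
    rw [hstep1]
    have hfp : t ≠ [] → h.1 ≠ -1 := by
      intro hne'
      apply hnl h
      cases t with
      | nil => exact absurd rfl hne'
      | cons d ds => simp [List.dropLast]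
    have hl : ∀ x ∈ t.dropLast, x.1 ≠ -1 := by
      intro x hx
      apply hnl x
      cases t with
      | nil => simp at hx
      | cons d ds => simp [List.dropLast] at hx ⊢; right; exact hx
    rw [pvFoldA t [] h.1 h.2 h.1 h.2 hfp hl]
    obtain ⟨g, gs, iL, L, rest, b1, b2, b3, b4⟩ := pvGroupB t h 0
    rw [b1]
    simp only [List.map_cons, b3]
    rw [List.nil_append, b4 h.1 h.2]
    congr 1
    simp [pvRenderGroup, b2, pvEmit]

theorem port_mapping_dict_to_str_changed : Claim_changed_port_mapping_dict_to_str := by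
  unfold Claim_changed_port_mapping_dict_to_str; decide
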